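-- pv_equiv track=rewrite | github.com/Geometrie/Fractcal | HilbertCurve.py | curve_map
-- ===== SOURCE A (Python) =====
-- def curve_map(position, sum_len):
--     index = [0] * sum_len
--     for i in range(sum_len):
--         index[sum_len - i - 1] = position % 4
--         position = position // 4
--     mat = [1, 0, 0, 1]
--     x = 0
--     y = 0
--     for i in range(sum_len):
--         x_tmp = (index[i]) % 4 // 2 * 2 - 1
--         y_tmp = (index[i] + 1) % 4 // 2 * 2 - 1
--         x = x * 2 + mat[0] * x_tmp + mat[1] * y_tmp
--         y = y * 2 + mat[2] * x_tmp + mat[3] * y_tmp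
--         if (index[i] == 0):
--             mat_tmp = mat * 1
--             mat[0] = mat_tmp[1]
--             mat[1] = mat_tmp[0]
--             mat[2] = mat_tmp[3]
--             mat[3] = mat_tmp[2]
--         elif (index[i] == 3):
--             mat_tmp = mat * 1
--             mat[0] = -mat_tmp[1]
--             mat[1] = -mat_tmp[0]
--             mat[2] = -mat_tmp[3]
--             mat[3] = -mat_tmp[2]
--     return [x, y]
-- ===== SOURCE B (Python) =====
-- def curve_map(position, sum_len):
--     # Bottom-up Hilbert decode (classic d2xy): walk the base-4 digits LSB-first,
--     # rotating/reflecting the accumulated point per quadrant, then map the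
--     # [0, 2**n) grid coordinates affinely to the signed coordinates A uses.
--     x = y = 0
--     t = position
--     s = 1
--     for _ in range(sum_len):
--         rx = (t // 2) % 2
--         ry = (t + rx) % 2
--         if ry == 0:
--             if rx == 1:
--                 x = s - 1 - x
--                 y = s - 1 - y
--             x, y = y, x
--         x += s * rx
--         y += s * ry
--         t //= 4
--         s *= 2
--     return [2 * x - (s - 1), 2 * y - (s - 1)]
-- ===== Notes on version B (the rewrite author's own statement) =====
-- stated objective: alternative
-- what changed: A's top-down MSB-first scan that precomputes a digit table and threads a 2x2 orientation matrix (with swap/negate updates) through a Horner-style accumulation is replaced by the classic bottom-up d2xy Hilbert decode: a single LSB-first loop that rotates/reflects the accumulated point itself per quadrant (no digit array, no matrix), followed by one affine map from [0,2^n) grid coordinates to A's signed coordinates.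
import Mathlib
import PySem

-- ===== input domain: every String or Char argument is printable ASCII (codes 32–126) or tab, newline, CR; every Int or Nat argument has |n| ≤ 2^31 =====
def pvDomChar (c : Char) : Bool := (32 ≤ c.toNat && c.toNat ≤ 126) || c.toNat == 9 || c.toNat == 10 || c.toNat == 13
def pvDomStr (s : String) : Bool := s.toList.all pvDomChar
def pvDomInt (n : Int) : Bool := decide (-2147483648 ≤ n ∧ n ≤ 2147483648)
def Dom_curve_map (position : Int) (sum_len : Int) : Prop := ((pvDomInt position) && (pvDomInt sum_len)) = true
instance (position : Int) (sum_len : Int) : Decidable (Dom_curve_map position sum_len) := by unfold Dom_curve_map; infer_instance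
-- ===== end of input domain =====

-- B replaces A's MSB-first matrix-threading scan (digit table + 2x2 orientation matrix)
-- by the classic bottom-up d2xy Hilbert decode: one LSB-first loop rotating/reflecting the
-- accumulated point per quadrant, then an affine map from grid to A's signed coordinates.

-- ===== PORT A =====
-- first loop body: index[sum_len - i - 1] = position % 4; position = position // 4
def stepA1 (sum_len : Int) (st : List Int × Int) (i : Int) : List Int × Int :=
  (PySem.List.pySetD st.1 (sum_len - i - 1) (PySem.Int.mod st.2 4), PySem.Int.floordiv st.2 4)

-- second loop body applied to di = index[i]; the fixed 4-element list mat is ported as a 4-tuple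
def stepA2 (st : (Int × Int × Int × Int) × Int × Int) (di : Int) : (Int × Int × Int × Int) × Int × Int :=
  let m := st.1
  let x_tmp := PySem.Int.floordiv (PySem.Int.mod di 4) 2 * 2 - 1
  let y_tmp := PySem.Int.floordiv (PySem.Int.mod (di + 1) 4) 2 * 2 - 1
  let x := st.2.1 * 2 + m.1 * x_tmp + m.2.1 * y_tmp
  let y := st.2.2 * 2 + m.2.2.1 * x_tmp + m.2.2.2 * y_tmp
  let mat := if di = 0 then (m.2.1, m.1, m.2.2.2, m.2.2.1)
             else if di = 3 then (-m.2.1, -m.1, -m.2.2.2, -m.2.2.1)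
             else m
  (mat, x, y)

def curve_map (position : Int) (sum_len : Int) : List Int :=
  -- index = [0] * sum_len
  let index0 : List Int := PySem.List.pyRepeat [0] sum_len
  let s1 := (PySem.List.pyRange 0 sum_len 1).foldl (stepA1 sum_len) (index0, position)
  let index := s1.1
  -- index[i] is always in range here, so the total pyGetD is exact
  let s2 := (PySem.List.pyRange 0 sum_len 1).foldl
      (fun st i => stepA2 st (PySem.List.pyGetD index i 0)) ((1, 0, 0, 1), 0, 0)
  [s2.2.1, s2.2.2]

-- ===== PORT B =====
-- Source B loop body; state ((x, y), t, s); the loop variable is ignored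
def stepB (st : (Int × Int) × Int × Int) (_i : Int) : (Int × Int) × Int × Int :=
  let t := st.2.1
  let s := st.2.2
  let rx := PySem.Int.mod (PySem.Int.floordiv t 2) 2
  let ry := PySem.Int.mod (t + rx) 2
  let xy := if ry = 0 then
              (if rx = 1 then (s - 1 - st.1.2, s - 1 - st.1.1) else (st.1.2, st.1.1))
            else st.1
  ((xy.1 + s * rx, xy.2 + s * ry), PySem.Int.floordiv t 4, s * 2)

def curve_map_alt (position : Int) (sum_len : Int) : List Int :=
  let st := (PySem.List.pyRange 0 sum_len 1).foldl stepB ((0, 0), position, 1)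
  [2 * st.1.1 - (st.2.2 - 1), 2 * st.1.2 - (st.2.2 - 1)]

-- ===== PRECONDITION & SPEC =====
def Spec_curve_map (position : Int) (sum_len : Int) (out : List Int) : Prop := out = curve_map_alt position sum_len
instance (position : Int) (sum_len : Int) (out : List Int) : Decidable (Spec_curve_map position sum_len out) := by unfold Spec_curve_map; infer_instance

-- ===== CLAIM (what is proved, stated in full; the proofs are below) =====
def Claim_equal_curve_map : Prop := ∀ (position : Int) (sum_len : Int), Dom_curve_map position sum_len → Spec_curve_map position sum_len (curve_map position sum_len)

-- ===== LEMMAS AND PROOFS =====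

-- k-th base-4 digit of p (floor semantics)
def dig4 (p : Int) (k : Nat) : Int := PySem.Int.mod (PySem.Int.floordiv p (4 ^ k)) 4

-- the digit list A's first loop builds: MSB first
def digL (m : Nat) (p : Int) : List Int := (List.range m).map (fun j => dig4 p (m - 1 - j))

-- one B iteration as a pure state map (stepB ignores its loop variable)
def stepB1 (st : (Int × Int) × Int × Int) : (Int × Int) × Int × Int := stepB st 0

theorem dig4_bounds (p : Int) (k : Nat) : 0 ≤ dig4 p k ∧ dig4 p k < 4 :=
  ⟨PySem.Int.mod_nonneg _ (by norm_num), PySem.Int.mod_lt _ (by norm_num)⟩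

theorem dig4_fdiv (p : Int) (k : Nat) : dig4 (PySem.Int.floordiv p 4) k = dig4 p (k + 1) := by
  unfold dig4
  rw [PySem.Int.floordiv_eq_ediv_of_pos (by norm_num : (0:Int) < 4),
      PySem.Int.floordiv_eq_ediv_of_pos (by positivity : (0:Int) < 4 ^ k),
      PySem.Int.floordiv_eq_ediv_of_pos (by positivity : (0:Int) < 4 ^ (k+1)),
      Int.ediv_ediv_of_nonneg (by norm_num : (0:Int) ≤ 4), ← pow_succ']

theorem dig4_zero (p : Int) : dig4 p 0 = PySem.Int.mod p 4 := by
  unfold dig4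
  rw [pow_zero, PySem.Int.floordiv_eq_ediv_of_pos (by norm_num : (0:Int) < 1), Int.ediv_one]

theorem digL_succ (m : Nat) (p : Int) :
    digL (m + 1) p = digL m (PySem.Int.floordiv p 4) ++ [PySem.Int.mod p 4] := by
  simp only [digL, List.range_succ, List.map_append, List.map_cons, List.map_nil]
  congr 1
  · apply List.map_congr_left
    intro j hj
    rw [List.mem_range] at hj
    rw [dig4_fdiv]
    congr 1
    omega
  · rw [show m + 1 - 1 - m = 0 by omega, dig4_zero]

theorem digL_cons (m : Nat) (p : Int) : digL (m + 1) p = dig4 p m :: digL m p := by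
  unfold digL
  rw [List.range_succ_eq_map, List.map_cons, List.map_map]
  refine congrArg₂ List.cons ?_ (List.map_congr_left fun j hj => ?_)
  · norm_num
  · show dig4 p _ = dig4 p _
    congr 1
    omega

theorem loop1 (m : Nat) : ∀ (N a p : Int) (l : List Int), 0 ≤ a → N = a + m → l.length = N.toNat →
    ((PySem.List.pyRange a N 1).foldl (stepA1 N) (l, p)).1 = digL m p ++ l.drop m := by
  induction m with
  | zero =>
    intro N a p l ha hN hl
    rw [PySem.List.pyRange_one_eq_nil (by omega)]
    simp [digL]
  | succ m ih =>
    intro N a p l ha hN hl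
    have hm : m < l.length := by omega
    rw [PySem.List.pyRange_one_cons (by omega), List.foldl_cons]
    have hstep : stepA1 N (l, p) a = (l.set m (PySem.Int.mod p 4), PySem.Int.floordiv p 4) := by
      unfold stepA1
      rw [PySem.List.pySetD_of_nonneg _ _ (by omega)]
      congr 2
      omega
    rw [hstep, ih N (a + 1) _ _ (by omega) (by omega) (by simpa using hl)]
    rw [List.drop_set, if_neg (by omega), Nat.sub_self,
        List.drop_eq_getElem_cons hm, List.set_cons_zero, digL_succ]
    simp

-- a foldl of stepB over any list is pure iteration of stepB1
theorem foldl_stepB (l : List Int) : ∀ st, l.foldl stepB st = stepB1^[l.length] st := by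
  induction l with
  | nil => intro st; simp
  | cons a l ih =>
    intro st
    rw [List.foldl_cons, List.length_cons, Function.iterate_succ_apply, ih]
    rfl

-- the t- and s-components of B's state after n iterations
theorem stepB_state (n : Nat) (p : Int) :
    (stepB1^[n] ((0, 0), p, 1)).2 = (PySem.Int.floordiv p (4 ^ n), (2 : Int) ^ n) := by
  induction n with
  | zero =>
    simp
  | succ n ih =>
    rw [Function.iterate_succ_apply', stepB1, stepB]
    simp only [ih]
    refine Prod.ext ?_ ?_
    · show PySem.Int.floordiv (PySem.Int.floordiv p (4 ^ n)) 4 = PySem.Int.floordiv p (4 ^ (n+1))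
      rw [PySem.Int.floordiv_eq_ediv_of_pos (by norm_num : (0:Int) < 4),
          PySem.Int.floordiv_eq_ediv_of_pos (by positivity : (0:Int) < 4 ^ n),
          PySem.Int.floordiv_eq_ediv_of_pos (by positivity : (0:Int) < 4 ^ (n+1)),
          Int.ediv_ediv_of_nonneg (by positivity : (0:Int) ≤ 4 ^ n), ← pow_succ]
    · show (2:Int) ^ n * 2 = 2 ^ (n + 1)
      rw [pow_succ]

-- Main invariant: A's MSB-first matrix fold over the digit list, started from an arbitrary
-- matrix/accumulator state, equals the stated affine image of B's bottom-up grid point.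
theorem hilbert_inv (n : Nat) : ∀ (p m0 m1 m2 m3 x y : Int),
    ((digL n p).foldl stepA2 ((m0, m1, m2, m3), x, y)).2 =
      (2 ^ n * x + m0 * (2 * (stepB1^[n] ((0,0), p, 1)).1.1 - (2 ^ n - 1))
                 + m1 * (2 * (stepB1^[n] ((0,0), p, 1)).1.2 - (2 ^ n - 1)),
       2 ^ n * y + m2 * (2 * (stepB1^[n] ((0,0), p, 1)).1.1 - (2 ^ n - 1))
                 + m3 * (2 * (stepB1^[n] ((0,0), p, 1)).1.2 - (2 ^ n - 1))) := by
  induction n with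
  | zero =>
    intro p m0 m1 m2 m3 x y
    simp [digL]
  | succ n ih =>
    intro p m0 m1 m2 m3 x y
    have hb := dig4_bounds p n
    have hst := stepB_state n p
    set t : Int := PySem.Int.floordiv p (4 ^ n) with ht
    have hd4 : dig4 p n = PySem.Int.mod t 4 := rfl
    have hmod4 : PySem.Int.mod t 4 = t % 4 := PySem.Int.mod_eq_emod_of_pos (by norm_num)
    have h1 : (stepB1^[n] ((0,0), p, 1)).2.1 = t := by rw [hst]
    have h2 : (stepB1^[n] ((0,0), p, 1)).2.2 = 2 ^ n := by rw [hst]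
    rw [digL_cons, List.foldl_cons, Function.iterate_succ_apply']
    rcases (by omega : dig4 p n = 0 ∨ dig4 p n = 1 ∨ dig4 p n = 2 ∨ dig4 p n = 3) with h|h|h|h
    · -- digit 0
      have h4 : t % 4 = 0 := by rw [← hmod4, ← hd4, h]
      have hrx : PySem.Int.mod (PySem.Int.floordiv t 2) 2 = 0 := by
        rw [PySem.Int.floordiv_eq_ediv_of_pos (by norm_num : (0:Int) < 2),
            PySem.Int.mod_eq_emod_of_pos (by norm_num)]
        omega
      have hry : PySem.Int.mod (t + 0) 2 = 0 := by
        rw [PySem.Int.mod_eq_emod_of_pos (by norm_num)]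
        omega
      have e1 : PySem.Int.floordiv (PySem.Int.mod (0:Int) 4) 2 * 2 - 1 = -1 := by decide
      have e2 : PySem.Int.floordiv (PySem.Int.mod ((0:Int) + 1) 4) 2 * 2 - 1 = -1 := by decide
      rw [h]
      simp only [stepB1, stepB, stepA2, h1, h2, hrx, hry, e1, e2,
        show (((0:Int)) = 3) = False from by decide,
        show (((0:Int)) = 1) = False from by decide,
        if_true,
        if_false]
      rw [ih]
      simp only [Prod.mk.injEq]
      constructor <;> ring
    · -- digit 1
      have h4 : t % 4 = 1 := by rw [← hmod4, ← hd4, h]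
      have hrx : PySem.Int.mod (PySem.Int.floordiv t 2) 2 = 0 := by
        rw [PySem.Int.floordiv_eq_ediv_of_pos (by norm_num : (0:Int) < 2),
            PySem.Int.mod_eq_emod_of_pos (by norm_num)]
        omega
      have hry : PySem.Int.mod (t + 0) 2 = 1 := by
        rw [PySem.Int.mod_eq_emod_of_pos (by norm_num)]
        omega
      have e1 : PySem.Int.floordiv (PySem.Int.mod (1:Int) 4) 2 * 2 - 1 = -1 := by decide
      have e2 : PySem.Int.floordiv (PySem.Int.mod ((1:Int) + 1) 4) 2 * 2 - 1 = 1 := by decide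
      rw [h]
      simp only [stepB1, stepB, stepA2, h1, h2, hrx, hry, e1, e2,
        show (((1:Int)) = 0) = False from by decide,
        show (((1:Int)) = 3) = False from by decide,
        show (((0:Int)) = 1) = False from by decide,
        if_false]
      rw [ih]
      simp only [Prod.mk.injEq]
      constructor <;> ring
    · -- digit 2
      have h4 : t % 4 = 2 := by rw [← hmod4, ← hd4, h]
      have hrx : PySem.Int.mod (PySem.Int.floordiv t 2) 2 = 1 := by
        rw [PySem.Int.floordiv_eq_ediv_of_pos (by norm_num : (0:Int) < 2),
            PySem.Int.mod_eq_emod_of_pos (by norm_num)]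
        omega
      have hry : PySem.Int.mod (t + 1) 2 = 1 := by
        rw [PySem.Int.mod_eq_emod_of_pos (by norm_num)]
        omega
      have e1 : PySem.Int.floordiv (PySem.Int.mod (2:Int) 4) 2 * 2 - 1 = 1 := by decide
      have e2 : PySem.Int.floordiv (PySem.Int.mod ((2:Int) + 1) 4) 2 * 2 - 1 = 1 := by decide
      rw [h]
      simp only [stepB1, stepB, stepA2, h1, h2, hrx, hry, e1, e2,
        show (((2:Int)) = 0) = False from by decide,
        show (((2:Int)) = 3) = False from by decide,
        show (((1:Int)) = 0) = False from by decide,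
        if_true,
        if_false]
      rw [ih]
      simp only [Prod.mk.injEq]
      constructor <;> ring
    · -- digit 3
      have h4 : t % 4 = 3 := by rw [← hmod4, ← hd4, h]
      have hrx : PySem.Int.mod (PySem.Int.floordiv t 2) 2 = 1 := by
        rw [PySem.Int.floordiv_eq_ediv_of_pos (by norm_num : (0:Int) < 2),
            PySem.Int.mod_eq_emod_of_pos (by norm_num)]
        omega
      have hry : PySem.Int.mod (t + 1) 2 = 0 := by
        rw [PySem.Int.mod_eq_emod_of_pos (by norm_num)]
        omega
      have e1 : PySem.Int.floordiv (PySem.Int.mod (3:Int) 4) 2 * 2 - 1 = 1 := by decide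
      have e2 : PySem.Int.floordiv (PySem.Int.mod ((3:Int) + 1) 4) 2 * 2 - 1 = -1 := by decide
      rw [h]
      simp only [stepB1, stepB, stepA2, h1, h2, hrx, hry, e1, e2,
        show (((3:Int)) = 0) = False from by decide,
        if_true,
        if_false]
      rw [ih]
      simp only [Prod.mk.injEq]
      constructor <;> ring

theorem curve_map_eq_alt : ∀ (position : Int) (sum_len : Int),
    curve_map position sum_len = curve_map_alt position sum_len := by
  intro p N
  by_cases hN : N ≤ 0
  · unfold curve_map curve_map_alt
    rw [PySem.List.pyRange_one_eq_nil hN]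
    simp
  · rw [not_le] at hN
    unfold curve_map curve_map_alt
    simp only []
    have hNm : ((N.toNat : Nat) : Int) = N := by omega
    have hidx : ((PySem.List.pyRange 0 N 1).foldl (stepA1 N) (PySem.List.pyRepeat [0] N, p)).1
        = digL N.toNat p := by
      rw [PySem.List.pyRepeat_singleton,
          loop1 N.toNat N 0 p _ (le_refl 0) (by omega) (by simp)]
      simp
    rw [hidx]
    set L := digL N.toNat p with hL
    have hlen : ((L.length : Nat) : Int) = N := by
      rw [hL]; simp [digL]; omega
    rw [← hlen, PySem.List.foldl_pyRange_zero_pyGetD', hlen, hL]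
    rw [foldl_stepB, PySem.List.length_pyRange_one]
    have hkey := hilbert_inv N.toNat p 1 0 0 1 0 0
    have hss := stepB_state N.toNat p
    rw [show (N - 0).toNat = N.toNat by omega, hkey]
    have h2 : (stepB1^[N.toNat] ((0,0), p, 1)).2.2 = (2:Int) ^ N.toNat := by rw [hss]
    rw [h2]
    norm_num

-- ===== VERDICT (by name: the statement is the Claim_ definition above) =====
theorem curve_map_spec : Claim_equal_curve_map := by
  unfold Claim_equal_curve_map Spec_curve_map
  exact fun p N _ => curve_map_eq_alt p N
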